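-- pv_equiv track=rewrite | github.com/Jirapol-Pongthong/my_dev_OOD | lab3/OOD_lab3_2.py | calculate_plate_diff
-- ===== SOURCE A (Python) =====
-- def calculate_plate_diff(current_plates, next_plates):
--     po = []
--     pu = []
--     stack = current_plates[:]
--
--     # ถอดทีละแผ่นจากนอกสุดไปในสุด
--     while stack and stack != next_plates[:len(stack)]:
--         po.append(stack.pop())
--
--     # ใส่กลับถ้าต้องใช้อีก
--     remaining = next_plates[len(stack):]
--     for p in remaining:
--         pu.append(p)
--
--     return po, pu
-- ===== SOURCE B (Python) =====
-- def calculate_plate_diff(current_plates, next_plates):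
--     # longest common prefix length, single pass
--     k = 0
--     while k < len(current_plates) and k < len(next_plates) and current_plates[k] == next_plates[k]:
--         k += 1
--     return current_plates[k:][::-1], next_plates[k:]
-- ===== Notes on version B (the rewrite author's own statement) =====
-- stated objective: faster
-- what changed: A repeatedly re-slices and compares whole prefixes while popping (quadratic); B computes the longest common prefix length in one pass and slices both lists once.
import Mathlib
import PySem

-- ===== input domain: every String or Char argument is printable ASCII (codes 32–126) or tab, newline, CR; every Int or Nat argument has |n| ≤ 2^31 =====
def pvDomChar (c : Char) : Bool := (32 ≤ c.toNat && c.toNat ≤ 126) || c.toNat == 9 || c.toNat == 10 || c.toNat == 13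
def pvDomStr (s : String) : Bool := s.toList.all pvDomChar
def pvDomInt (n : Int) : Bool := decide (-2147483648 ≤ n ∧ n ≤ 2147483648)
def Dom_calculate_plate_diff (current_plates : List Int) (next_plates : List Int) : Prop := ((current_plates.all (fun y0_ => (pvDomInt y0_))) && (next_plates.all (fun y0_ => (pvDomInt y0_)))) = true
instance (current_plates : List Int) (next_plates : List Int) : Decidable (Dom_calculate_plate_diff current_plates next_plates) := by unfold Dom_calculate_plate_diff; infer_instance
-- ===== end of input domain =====

-- B replaces A's pop-and-recompare loop (quadratic prefix comparisons) by a single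
-- longest-common-prefix scan followed by two slices.

-- ===== PORT A =====
-- the while loop: pop from the end of `stack` into `po` while `stack` is nonempty
-- and is not a prefix of `next_plates`; returns the final (stack, po)
def pvALoop (next_plates : List Int) (stack : List Int) (po : List Int) : List Int × List Int :=
  if h : stack ≠ [] ∧ stack ≠ next_plates.take stack.length then
    pvALoop next_plates stack.dropLast (po ++ [stack.getLast h.1])
  else
    (stack, po)
termination_by stack.length
decreasing_by
  have : 0 < stack.length := List.length_pos_iff.mpr h.1
  rw [List.length_dropLast]; omega

def calculate_plate_diff (current_plates : List Int) (next_plates : List Int) : List Int × List Int :=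
  let sp := pvALoop next_plates current_plates []
  let remaining := next_plates.drop sp.1.length
  let pu := remaining.foldl (fun acc p => acc ++ [p]) []
  (sp.2, pu)

-- ===== PORT B =====
-- longest common prefix length, single pass
def pvLcp : List Int → List Int → Nat
  | a :: as, b :: bs => if a = b then pvLcp as bs + 1 else 0
  | _, _ => 0

def calculate_plate_diff_alt (current_plates : List Int) (next_plates : List Int) : List Int × List Int :=
  let k := pvLcp current_plates next_plates
  ((current_plates.drop k).reverse, next_plates.drop k)

-- ===== PRECONDITION & SPEC =====
def Spec_calculate_plate_diff (current_plates : List Int) (next_plates : List Int) (out : List Int × List Int) : Prop := out = calculate_plate_diff_alt current_plates next_plates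
instance (current_plates : List Int) (next_plates : List Int) (out : List Int × List Int) : Decidable (Spec_calculate_plate_diff current_plates next_plates out) := by unfold Spec_calculate_plate_diff; infer_instance

-- ===== CLAIM (what is proved, stated in full; the proofs are below) =====
def Claim_equal_calculate_plate_diff : Prop := ∀ (current_plates : List Int) (next_plates : List Int), Dom_calculate_plate_diff current_plates next_plates → Spec_calculate_plate_diff current_plates next_plates (calculate_plate_diff current_plates next_plates)

-- ===== LEMMAS AND PROOFS =====

theorem pvLcp_le (s n : List Int) : pvLcp s n ≤ s.length := by
  induction s generalizing n with
  | nil => simp [pvLcp]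
  | cons a as ih =>
    cases n with
    | nil => simp [pvLcp]
    | cons b bs =>
      simp only [pvLcp, List.length_cons]
      split_ifs
      · exact Nat.succ_le_succ (ih bs)
      · omega

theorem pvLcp_of_prefix (s n : List Int) (h : s = n.take s.length) :
    pvLcp s n = s.length := by
  induction s generalizing n with
  | nil => simp [pvLcp]
  | cons a as ih =>
    cases n with
    | nil => simp at h
    | cons b bs =>
      simp only [List.length_cons, List.take_succ_cons, List.cons.injEq] at h
      simp [pvLcp, h.1, ih bs h.2]

theorem prefix_of_pvLcp (s n : List Int) (h : pvLcp s n = s.length) :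
    s = n.take s.length := by
  induction s generalizing n with
  | nil => simp
  | cons a as ih =>
    cases n with
    | nil => simp [pvLcp] at h
    | cons b bs =>
      simp only [pvLcp, List.length_cons] at h
      by_cases hab : a = b
      · simp only [hab, if_true] at h
        simp [hab, List.take_succ_cons, ← ih bs (by omega)]
      · simp [hab] at h

theorem pvLcp_dropLast (s n : List Int) (h : pvLcp s n < s.length) :
    pvLcp s.dropLast n = pvLcp s n := by
  induction s generalizing n with
  | nil => simp at h
  | cons a as ih =>
    cases n with
    | nil =>
      cases as with
      | nil => simp [pvLcp]
      | cons c cs => simp [pvLcp]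
    | cons b bs =>
      by_cases hab : a = b
      · simp only [pvLcp, hab, if_true, List.length_cons] at h ⊢
        have has : pvLcp as bs < as.length := by omega
        have : as ≠ [] := by
          intro he; rw [he] at has; simp [pvLcp] at has
        rw [List.dropLast_cons_of_ne_nil this]
        simp [pvLcp, ih bs has]
      · cases as with
        | nil => simp [pvLcp, hab]
        | cons c cs => simp [pvLcp, hab]

theorem drop_reverse_split (s : List Int) (k : Nat) (hs : s ≠ []) (hk : k < s.length) :
    (s.drop k).reverse = s.getLast hs :: (s.dropLast.drop k).reverse := by
  conv_lhs => rw [← List.dropLast_concat_getLast hs]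
  rw [List.drop_append_of_le_length (by simp [List.length_dropLast]; omega)]
  simp

theorem pvALoop_eq (next_plates : List Int) (s po : List Int) :
    pvALoop next_plates s po =
      (s.take (pvLcp s next_plates), po ++ (s.drop (pvLcp s next_plates)).reverse) := by
  induction hL : s.length using Nat.strong_induction_on generalizing s po with
  | _ L ih =>
  rw [pvALoop]
  by_cases h : s ≠ [] ∧ s ≠ next_plates.take s.length
  · rw [dif_pos h]
    have hlt : pvLcp s next_plates < s.length := by
      rcases Nat.lt_or_ge (pvLcp s next_plates) s.length with h' | h'
      · exact h'
      · exact absurd (prefix_of_pvLcp s next_plates (le_antisymm (pvLcp_le s next_plates) h')) h.2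
    have hpos : 0 < s.length := List.length_pos_iff.mpr h.1
    have hdl : s.dropLast.length < L := by
      rw [← hL, List.length_dropLast]; omega
    rw [ih _ hdl _ _ rfl, pvLcp_dropLast s next_plates hlt]
    simp only [Prod.mk.injEq]
    refine ⟨?_, ?_⟩
    · rw [List.dropLast_eq_take, List.take_take]
      congr 1
      omega
    · rw [drop_reverse_split s _ h.1 hlt]; simp
  · rw [dif_neg h]
    push Not at h
    by_cases hnil : s = []
    · subst hnil; simp [pvLcp]
    · have := pvLcp_of_prefix s next_plates (h hnil)
      simp [this]

theorem foldl_append_id (l acc : List Int) :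
    l.foldl (fun acc p => acc ++ [p]) acc = acc ++ l := by
  induction l generalizing acc with
  | nil => simp
  | cons a as ih => simp [List.foldl, ih]

-- ===== VERDICT (by name: the statement is the Claim_ definition above) =====
theorem calculate_plate_diff_spec : Claim_equal_calculate_plate_diff := by
  intro c n _
  unfold Spec_calculate_plate_diff calculate_plate_diff calculate_plate_diff_alt
  rw [pvALoop_eq]
  have hle := pvLcp_le c n
  simp only [foldl_append_id, List.nil_append, List.length_take]
  rw [Nat.min_eq_left hle]
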